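-- pv_equiv track=rewrite | github.com/mohamed-elkholy95/Pythinker | backend/app/domain/utils/json_repair.py | _remove_js_comments
-- ===== SOURCE A (Python) =====
-- def _remove_js_comments(text: str) -> str:
--     result = []
--     i = 0
--     in_string = False
--     escape_next = False
--
--     while i < len(text):
--         ch = text[i]
--
--         if escape_next:
--             result.append(ch)
--             escape_next = False
--             i += 1
--             continue
--
--         if ch == "\\" and in_string:
--             result.append(ch)
--             escape_next = True
--             i += 1
--             continue
--
--         if ch == '"':
--             in_string = not in_string
--             result.append(ch)
--             i += 1
--             continue
--
--         if in_string:
--             result.append(ch)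
--             i += 1
--             continue
--
--         if ch == "/" and i + 1 < len(text):
--             next_ch = text[i + 1]
--             if next_ch == "/":
--                 while i < len(text) and text[i] != "\n":
--                     i += 1
--                 continue
--             if next_ch == "*":
--                 i += 2
--                 while i + 1 < len(text) and not (text[i] == "*" and text[i + 1] == "/"):
--                     i += 1
--                 i += 2
--                 continue
--
--         result.append(ch)
--         i += 1
--
--     return "".join(result)
-- ===== SOURCE B (Python) =====
-- def _remove_js_comments(text: str) -> str:
--     # 7-state DFA over the characters: no index arithmetic or lookahead,
--     # a pending '/' is represented by the SLASH state and flushed at EOF.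
--     OUT, SLASH, STR, ESC, LINE, BLOCK, STAR = range(7)
--     state = OUT
--     out = []
--     for ch in text:
--         if state == OUT:
--             if ch == '/':
--                 state = SLASH
--             elif ch == '"':
--                 out.append(ch)
--                 state = STR
--             else:
--                 out.append(ch)
--         elif state == SLASH:
--             if ch == '/':
--                 state = LINE
--             elif ch == '*':
--                 state = BLOCK
--             elif ch == '"':
--                 out.append('/')
--                 out.append(ch)
--                 state = STR
--             else:
--                 out.append('/')
--                 out.append(ch)
--                 state = OUT
--         elif state == STR:
--             out.append(ch)
--             if ch == '\\':
--                 state = ESC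
--             elif ch == '"':
--                 state = OUT
--         elif state == ESC:
--             out.append(ch)
--             state = STR
--         elif state == LINE:
--             if ch == '\n':
--                 out.append(ch)
--                 state = OUT
--         elif state == BLOCK:
--             if ch == '*':
--                 state = STAR
--         else:  # STAR
--             if ch == '/':
--                 state = OUT
--             elif ch != '*':
--                 state = BLOCK
--     if state == SLASH:
--         out.append('/')
--     return ''.join(out)
-- ===== Notes on version B (the rewrite author's own statement) =====
-- stated objective: alternative
-- what changed: Replaces A's index-walking loop (in_string/escape_next flags plus nested comment-skipping while loops with index lookahead) by a 7-state character DFA (OUT/SLASH/STR/ESC/LINE/BLOCK/STAR) folded once over the characters with no index arithmetic; a pending slash is held in the SLASH state and flushed at end of input.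
import Mathlib
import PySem

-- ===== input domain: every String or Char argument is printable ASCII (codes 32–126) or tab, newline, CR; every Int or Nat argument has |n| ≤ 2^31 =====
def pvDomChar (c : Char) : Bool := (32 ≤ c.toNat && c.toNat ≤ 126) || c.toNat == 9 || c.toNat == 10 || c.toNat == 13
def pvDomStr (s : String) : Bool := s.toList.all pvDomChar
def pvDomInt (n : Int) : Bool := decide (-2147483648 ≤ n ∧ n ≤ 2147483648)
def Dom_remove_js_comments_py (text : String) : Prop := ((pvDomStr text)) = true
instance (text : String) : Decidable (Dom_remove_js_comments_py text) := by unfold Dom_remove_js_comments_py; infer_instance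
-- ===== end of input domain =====

-- B replaces A's index-walking loop (flags + nested skip loops) by a 7-state DFA folded once over the characters; objective: alternative (same O(n) cost).

-- ===== PORT A =====
-- inner `while i < len(text) and text[i] != "\n"` of the line-comment branch
def skipLineA (t : List Char) (i : Nat) : Nat :=
  if h : i < t.length ∧ t.getD i ' ' ≠ '\n' then skipLineA t (i + 1) else i
termination_by t.length - i
decreasing_by exact Nat.sub_succ_lt_self _ _ h.1

-- inner `while i + 1 < len(text) and not (text[i] == "*" and text[i+1] == "/")` followed by `i += 2`
def skipBlockA (t : List Char) (i : Nat) : Nat :=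
  if h : i + 1 < t.length ∧ ¬(t.getD i ' ' = '*' ∧ t.getD (i + 1) ' ' = '/') then
    skipBlockA t (i + 1)
  else i + 2
termination_by t.length - i
decreasing_by exact Nat.sub_succ_lt_self _ _ (Nat.lt_of_succ_lt h.1)

theorem skipLineA_ge (t : List Char) (i : Nat) : i ≤ skipLineA t i := by
  by_cases h : i < t.length ∧ t.getD i ' ' ≠ '\n'
  · rw [skipLineA, dif_pos h]
    exact Nat.le_trans (Nat.le_succ i) (skipLineA_ge t (i + 1))
  · rw [skipLineA, dif_neg h]
termination_by t.length - i
decreasing_by exact Nat.sub_succ_lt_self _ _ h.1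

theorem skipLineA_gt (t : List Char) (i : Nat) (h1 : i < t.length)
    (h2 : t.getD i ' ' ≠ '\n') : i < skipLineA t i := by
  rw [skipLineA, dif_pos ⟨h1, h2⟩]
  exact Nat.lt_of_lt_of_le (Nat.lt_succ_self i) (skipLineA_ge t (i + 1))

theorem skipBlockA_ge (t : List Char) (i : Nat) : i + 2 ≤ skipBlockA t i := by
  by_cases h : i + 1 < t.length ∧ ¬(t.getD i ' ' = '*' ∧ t.getD (i + 1) ' ' = '/')
  · rw [skipBlockA, dif_pos h]
    exact Nat.le_trans (Nat.le_succ (i + 2)) (skipBlockA_ge t (i + 1))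
  · rw [skipBlockA, dif_neg h]
termination_by t.length - i
decreasing_by exact Nat.sub_succ_lt_self _ _ (Nat.lt_of_succ_lt h.1)

-- the main `while i < len(text)` loop of A, state = (i, in_string, escape_next, result)
def loopA (t : List Char) (i : Nat) (instr esc : Bool) (acc : List Char) : List Char :=
  if h : i < t.length then
    if esc = true then loopA t (i + 1) instr false (acc ++ [t.getD i ' '])
    else if t.getD i ' ' = '\\' ∧ instr = true then loopA t (i + 1) instr true (acc ++ [t.getD i ' '])
    else if t.getD i ' ' = '"' then loopA t (i + 1) (!instr) false (acc ++ [t.getD i ' '])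
    else if instr = true then loopA t (i + 1) instr false (acc ++ [t.getD i ' '])
    else if hsl : t.getD i ' ' = '/' ∧ i + 1 < t.length then
      if t.getD (i + 1) ' ' = '/' then loopA t (skipLineA t i) instr esc acc
      else if t.getD (i + 1) ' ' = '*' then loopA t (skipBlockA t (i + 2)) instr esc acc
      else loopA t (i + 1) instr esc (acc ++ [t.getD i ' '])
    else loopA t (i + 1) instr esc (acc ++ [t.getD i ' '])
  else acc
termination_by t.length - i
decreasing_by
  · exact Nat.sub_succ_lt_self _ _ h
  · exact Nat.sub_succ_lt_self _ _ h
  · exact Nat.sub_succ_lt_self _ _ h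
  · exact Nat.sub_succ_lt_self _ _ h
  · exact Nat.sub_lt_sub_left h (skipLineA_gt t i h (by rw [hsl.1]; decide))
  · exact Nat.sub_lt_sub_left h
      (Nat.lt_of_lt_of_le (by omega) (skipBlockA_ge t (i + 2)))
  · exact Nat.sub_succ_lt_self _ _ h
  · exact Nat.sub_succ_lt_self _ _ h

def remove_js_comments_py (text : String) : String :=
  String.ofList (loopA text.toList 0 false false [])

-- ===== PORT B =====
-- B's DFA states (Source B: OUT, SLASH, STR, ESC, LINE, BLOCK, STAR)
inductive ModeB where
  | out | slash | str | esc | line | block | star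
deriving DecidableEq, Repr

-- one iteration of Source B's `for ch in text` body: (state, out) updated by ch
def stepB : ModeB × List Char → Char → ModeB × List Char
  | (ModeB.out, acc), c =>
      if c = '/' then (ModeB.slash, acc)
      else if c = '"' then (ModeB.str, acc ++ [c])
      else (ModeB.out, acc ++ [c])
  | (ModeB.slash, acc), c =>
      if c = '/' then (ModeB.line, acc)
      else if c = '*' then (ModeB.block, acc)
      else if c = '"' then (ModeB.str, acc ++ ['/', c])
      else (ModeB.out, acc ++ ['/', c])
  | (ModeB.str, acc), c =>
      if c = '\\' then (ModeB.esc, acc ++ [c])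
      else if c = '"' then (ModeB.out, acc ++ [c])
      else (ModeB.str, acc ++ [c])
  | (ModeB.esc, acc), c => (ModeB.str, acc ++ [c])
  | (ModeB.line, acc), c =>
      if c = '\n' then (ModeB.out, acc ++ [c]) else (ModeB.line, acc)
  | (ModeB.block, acc), c =>
      if c = '*' then (ModeB.star, acc) else (ModeB.block, acc)
  | (ModeB.star, acc), c =>
      if c = '/' then (ModeB.out, acc)
      else if c = '*' then (ModeB.star, acc)
      else (ModeB.block, acc)

-- Source B's final `if state == SLASH: out.append('/')`
def finishB (r : ModeB × List Char) : List Char :=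
  if r.1 = ModeB.slash then r.2 ++ ['/'] else r.2

def remove_js_comments_py_alt (text : String) : String :=
  String.ofList (finishB (text.toList.foldl stepB (ModeB.out, [])))

-- ===== PRECONDITION & SPEC =====
def Spec_remove_js_comments_py (text : String) (out : String) : Prop := out = remove_js_comments_py_alt text
instance (text : String) (out : String) : Decidable (Spec_remove_js_comments_py text out) := by unfold Spec_remove_js_comments_py; infer_instance

-- ===== CLAIM (what is proved, stated in full; the proofs are below) =====
def Claim_equal_remove_js_comments_py : Prop := ∀ (text : String), Dom_remove_js_comments_py text → Spec_remove_js_comments_py text (remove_js_comments_py text)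

-- ===== LEMMAS AND PROOFS =====

theorem loopA_stop (t : List Char) (i : Nat) (b1 b2 : Bool) (acc : List Char)
    (h : t.length ≤ i) : loopA t i b1 b2 acc = acc := by
  rw [loopA, dif_neg (by omega)]

theorem drop_stop (t : List Char) (i : Nat) (h : t.length ≤ i) : t.drop i = [] :=
  List.drop_eq_nil_of_le h

theorem fold_peel (s : ModeB × List Char) (t : List Char) (i : Nat) (h : i < t.length) :
    List.foldl stepB s (t.drop i) = List.foldl stepB (stepB s (t.getD i ' ')) (t.drop (i + 1)) := by
  rw [List.drop_eq_getElem_cons h, List.foldl_cons, List.getD_eq_getElem t ' ' h]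

-- the simulation invariant: A's loop from each of its reachable configurations
-- equals B's fold from the corresponding DFA state over the rest of the input
theorem simAB (t : List Char) : ∀ (n : Nat) (i : Nat) (acc : List Char), t.length - i ≤ n →
    (loopA t i false false acc = finishB (List.foldl stepB (ModeB.out, acc) (t.drop i))) ∧
    (loopA t i true false acc = finishB (List.foldl stepB (ModeB.str, acc) (t.drop i))) ∧
    (loopA t i true true acc = finishB (List.foldl stepB (ModeB.esc, acc) (t.drop i))) ∧
    (loopA t (skipLineA t i) false false acc = finishB (List.foldl stepB (ModeB.line, acc) (t.drop i))) ∧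
    (loopA t (skipBlockA t i) false false acc = finishB (List.foldl stepB (ModeB.block, acc) (t.drop i))) ∧
    (i < t.length → t.getD i ' ' = '*' →
      loopA t (skipBlockA t i) false false acc = finishB (List.foldl stepB (ModeB.star, acc) (t.drop (i + 1)))) := by
  intro n
  induction n with
  | zero =>
    intro i acc hn
    have hi : t.length ≤ i := by omega
    rw [skipLineA, dif_neg (by omega), skipBlockA, dif_neg (by omega), drop_stop t i hi]
    refine ⟨?_, ?_, ?_, ?_, ?_, ?_⟩ <;>
      simp [loopA_stop t i _ _ acc hi, loopA_stop t (i + 2) _ _ acc (by omega), finishB]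
    omega
  | succ n ih =>
    intro i acc hn
    by_cases hi : i < t.length
    case neg =>
      have hile : t.length ≤ i := by omega
      rw [skipLineA, dif_neg (by omega), skipBlockA, dif_neg (by omega), drop_stop t i hile]
      refine ⟨?_, ?_, ?_, ?_, ?_, ?_⟩ <;>
        simp [loopA_stop t i _ _ acc hile, loopA_stop t (i + 2) _ _ acc (by omega), finishB]
      omega
    case pos =>
    -- part (g): star
    have hg : i < t.length → t.getD i ' ' = '*' →
        loopA t (skipBlockA t i) false false acc =
          finishB (List.foldl stepB (ModeB.star, acc) (t.drop (i + 1))) := by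
      intro _ hstar
      by_cases h1 : i + 1 < t.length
      · rw [fold_peel _ t (i + 1) h1]
        by_cases hsl : t.getD (i + 1) ' ' = '/'
        · rw [skipBlockA, dif_neg (fun hc => hc.2 ⟨hstar, hsl⟩)]
          simp only [stepB, if_pos hsl]
          exact ((ih (i + 2) acc (by omega)).1)
        · rw [skipBlockA, dif_pos ⟨h1, fun hc => hsl hc.2⟩]
          by_cases hst : t.getD (i + 1) ' ' = '*'
          · simp only [stepB, if_neg hsl, if_pos hst]
            exact (ih (i + 1) acc (by omega)).2.2.2.2.2 h1 hst
          · simp only [stepB, if_neg hsl, if_neg hst]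
            by_cases h2 : i + 2 < t.length
            · rw [skipBlockA, dif_pos ⟨h2, fun hc => hst hc.1⟩]
              exact (ih (i + 2) acc (by omega)).2.2.2.2.1
            · rw [skipBlockA, dif_neg (by omega), drop_stop t (i + 2) (by omega)]
              simp [loopA_stop t (i + 1 + 2) _ _ acc (by omega), finishB]
      · rw [skipBlockA, dif_neg (by omega), drop_stop t (i + 1) (by omega)]
        simp [loopA_stop t (i + 2) _ _ acc (by omega), finishB]
    refine ⟨?_, ?_, ?_, ?_, ?_, hg⟩
    -- (a) out
    · rw [fold_peel _ t i hi]
      by_cases hq : t.getD i ' ' = '"'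
      · rw [loopA, dif_pos hi, if_neg (by decide), if_neg (by simp), if_pos hq]
        simp only [stepB, if_neg (by rw [hq]; decide : ¬ t.getD i ' ' = '/'), if_pos hq]
        exact (ih (i + 1) (acc ++ [t.getD i ' ']) (by omega)).2.1
      · by_cases hsl : t.getD i ' ' = '/'
        · simp only [stepB, if_pos hsl]
          by_cases h1 : i + 1 < t.length
          · rw [loopA, dif_pos hi, if_neg (by decide), if_neg (by simp), if_neg hq,
              if_neg (by decide), dif_pos ⟨hsl, h1⟩]
            rw [fold_peel _ t (i + 1) h1]
            by_cases hl : t.getD (i + 1) ' ' = '/'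
            · rw [if_pos hl]
              simp only [stepB, if_pos hl]
              have hrw : skipLineA t i = skipLineA t (i + 2) := by
                rw [skipLineA, dif_pos ⟨hi, by rw [hsl]; decide⟩,
                  skipLineA, dif_pos ⟨h1, by rw [hl]; decide⟩]
              rw [hrw]
              exact (ih (i + 2) acc (by omega)).2.2.2.1
            · by_cases hb : t.getD (i + 1) ' ' = '*'
              · rw [if_neg hl, if_pos hb]
                simp only [stepB, if_neg hl, if_pos hb]
                exact (ih (i + 2) acc (by omega)).2.2.2.2.1
              · rw [if_neg hl, if_neg hb]
                by_cases hq1 : t.getD (i + 1) ' ' = '"'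
                · simp only [stepB, if_neg hl, if_neg hb, if_pos hq1]
                  rw [loopA, dif_pos h1, if_neg (by decide), if_neg (by simp),
                    if_pos hq1]
                  have h12 : i + 1 + 1 = i + 2 := by omega
                  simp only [Bool.not_false, h12]
                  have := (ih (i + 2) (acc ++ [t.getD i ' '] ++ [t.getD (i + 1) ' ']) (by omega)).2.1
                  rw [this, hsl, hq1]
                  simp
                · simp only [stepB, if_neg hl, if_neg hb, if_neg hq1]
                  rw [loopA, dif_pos h1, if_neg (by decide), if_neg (by simp),
                    if_neg hq1, if_neg (by decide)]
                  have hns : ¬ (t.getD (i + 1) ' ' = '/' ∧ i + 1 + 1 < t.length) := by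
                    intro hc; exact hl hc.1
                  rw [dif_neg hns]
                  have h12 : i + 1 + 1 = i + 2 := by omega
                  simp only [h12]
                  have := (ih (i + 2) (acc ++ [t.getD i ' '] ++ [t.getD (i + 1) ' ']) (by omega)).1
                  rw [this, hsl]
                  simp
          · rw [loopA, dif_pos hi, if_neg (by decide), if_neg (by simp), if_neg hq,
              if_neg (by decide), dif_neg (by intro hc; exact h1 hc.2)]
            rw [loopA_stop t (i + 1) _ _ _ (by omega), drop_stop t (i + 1) (by omega), hsl]
            simp [finishB]
        · rw [loopA, dif_pos hi, if_neg (by decide), if_neg (by simp), if_neg hq,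
            if_neg (by decide), dif_neg (by intro hc; exact hsl hc.1)]
          simp only [stepB, if_neg hsl, if_neg hq]
          exact (ih (i + 1) (acc ++ [t.getD i ' ']) (by omega)).1
    -- (b) str
    · rw [fold_peel _ t i hi]
      by_cases hbsl : t.getD i ' ' = '\\'
      · rw [loopA, dif_pos hi, if_neg (by decide), if_pos ⟨hbsl, rfl⟩]
        simp only [stepB, if_pos hbsl]
        exact (ih (i + 1) (acc ++ [t.getD i ' ']) (by omega)).2.2.1
      · by_cases hq : t.getD i ' ' = '"'
        · rw [loopA, dif_pos hi, if_neg (by decide), if_neg (fun hc => hbsl hc.1), if_pos hq]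
          simp only [stepB, if_neg hbsl, if_pos hq, Bool.not_true]
          exact (ih (i + 1) (acc ++ [t.getD i ' ']) (by omega)).1
        · rw [loopA, dif_pos hi, if_neg (by decide), if_neg (fun hc => hbsl hc.1), if_neg hq,
            if_pos rfl]
          simp only [stepB, if_neg hbsl, if_neg hq]
          exact (ih (i + 1) (acc ++ [t.getD i ' ']) (by omega)).2.1
    -- (c) esc
    · rw [fold_peel _ t i hi, loopA, dif_pos hi, if_pos rfl]
      simp only [stepB]
      exact (ih (i + 1) (acc ++ [t.getD i ' ']) (by omega)).2.1
    -- (d) line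
    · rw [fold_peel _ t i hi]
      by_cases hnl : t.getD i ' ' = '\n'
      · rw [skipLineA, dif_neg (fun hc => hc.2 hnl)]
        simp only [stepB, if_pos hnl]
        rw [loopA, dif_pos hi, if_neg (by decide), if_neg (by simp), if_neg (by rw [hnl]; decide),
          if_neg (by decide), dif_neg (by rw [hnl]; intro hc; exact absurd hc.1 (by decide))]
        exact (ih (i + 1) (acc ++ [t.getD i ' ']) (by omega)).1
      · rw [skipLineA, dif_pos ⟨hi, hnl⟩]
        simp only [stepB, if_neg hnl]
        exact (ih (i + 1) acc (by omega)).2.2.2.1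
    -- (e) block
    · rw [fold_peel _ t i hi]
      by_cases hst : t.getD i ' ' = '*'
      · simp only [stepB, if_pos hst]
        exact hg hi hst
      · simp only [stepB, if_neg hst]
        by_cases h1 : i + 1 < t.length
        · rw [skipBlockA, dif_pos ⟨h1, fun hc => hst hc.1⟩]
          exact (ih (i + 1) acc (by omega)).2.2.2.2.1
        · rw [skipBlockA, dif_neg (by omega), drop_stop t (i + 1) (by omega)]
          simp [loopA_stop t (i + 2) _ _ acc (by omega), finishB]

-- ===== VERDICT (by name: the statement is the Claim_ definition above) =====
theorem remove_js_comments_py_spec : Claim_equal_remove_js_comments_py := by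
  intro text _
  unfold Spec_remove_js_comments_py remove_js_comments_py remove_js_comments_py_alt
  rw [(simAB text.toList text.toList.length 0 [] (by omega)).1]
  rfl
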